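-- pv_equiv track=rewrite | github.com/ryans94/CEC | scrape_faculty.py | fuzzy_match_department
-- ===== SOURCE A (Python) =====
-- from typing import List, Dict, Optional, Set
--
-- def fuzzy_match_department(text: str, departments: Dict[str, str]) -> Optional[str]:
--     """
--     Fuzzy/partial case-insensitive match of text against department names.
--     Returns department_id if match found, None otherwise.
--     """
--     if not text or not departments:
--         return None
--
--     text_lower = text.lower().strip()
--
--     # Try exact match first (case-insensitive)
--     for dept_name, dept_id in departments.items():
--         if text_lower == dept_name.lower():
--             return dept_id
--
--     # Try partial match - check if department name is contained in text
--     for dept_name, dept_id in departments.items():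
--         dept_lower = dept_name.lower()
--         if dept_lower in text_lower or text_lower in dept_lower:
--             return dept_id
--
--     return None
-- ===== SOURCE B (Python) =====
-- from typing import Dict, Optional
--
-- def fuzzy_match_department(text: str, departments: Dict[str, str]) -> Optional[str]:
--     """Single pass: return immediately on exact match, remember first partial match."""
--     if not text or not departments:
--         return None
--     text_lower = text.lower().strip()
--     partial = None
--     for dept_name, dept_id in departments.items():
--         dept_lower = dept_name.lower()
--         if text_lower == dept_lower:
--             return dept_id
--         if partial is None and (dept_lower in text_lower or text_lower in dept_lower):
--             partial = dept_id
--     return partial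
-- ===== Notes on version B (the rewrite author's own statement) =====
-- stated objective: alternative
-- what changed: Replaces A's two sequential full scans (exact pass, then substring pass) by a single scan that returns an exact match immediately and records the first partial match in a local variable, returned after the loop.
import Mathlib
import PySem

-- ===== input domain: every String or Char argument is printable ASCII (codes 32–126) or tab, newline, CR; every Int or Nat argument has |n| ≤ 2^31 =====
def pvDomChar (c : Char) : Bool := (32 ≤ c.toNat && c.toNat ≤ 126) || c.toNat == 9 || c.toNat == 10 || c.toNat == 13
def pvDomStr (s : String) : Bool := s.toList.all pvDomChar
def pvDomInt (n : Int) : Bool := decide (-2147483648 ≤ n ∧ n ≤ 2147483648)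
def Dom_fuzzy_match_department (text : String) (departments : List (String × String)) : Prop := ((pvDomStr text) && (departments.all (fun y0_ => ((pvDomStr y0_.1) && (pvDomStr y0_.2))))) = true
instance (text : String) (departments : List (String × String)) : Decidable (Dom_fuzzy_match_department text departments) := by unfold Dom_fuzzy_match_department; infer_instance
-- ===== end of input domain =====

-- B replaces A's two sequential scans with a single scan that returns an exact match
-- immediately and records the first partial match (objective: alternative decomposition).


-- ===== PORT A =====
-- first loop of A: exact case-insensitive match
def fmAExact (tl : String) : List (String × String) → Option String
  | [] => none
  | (dept_name, dept_id) :: rest =>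
      if tl = PySem.Str.lower dept_name then some dept_id else fmAExact tl rest

-- second loop of A: substring match either way
def fmAPartial (tl : String) : List (String × String) → Option String
  | [] => none
  | (dept_name, dept_id) :: rest =>
      let dept_lower := PySem.Str.lower dept_name
      if PySem.Str.isIn dept_lower tl || PySem.Str.isIn tl dept_lower then some dept_id
      else fmAPartial tl rest

def fuzzy_match_department (text : String) (departments : List (String × String)) : Option String :=
  if text = "" ∨ departments = [] then none
  else
    let text_lower := PySem.Str.strip (PySem.Str.lower text)
    match fmAExact text_lower departments with
    | some dept_id => some dept_id
    | none => fmAPartial text_lower departments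

-- ===== PORT B =====
-- B's single loop: 'partial_' is the recorded first partial match
def fmBLoop (tl : String) (partial_ : Option String) : List (String × String) → Option String
  | [] => partial_
  | (dept_name, dept_id) :: rest =>
      let dept_lower := PySem.Str.lower dept_name
      if tl = dept_lower then some dept_id
      else
        let partial' :=
          if partial_.isNone && (PySem.Str.isIn dept_lower tl || PySem.Str.isIn tl dept_lower)
          then some dept_id else partial_
        fmBLoop tl partial' rest

def fuzzy_match_department_alt (text : String) (departments : List (String × String)) : Option String :=
  if text = "" ∨ departments = [] then none
  else
    let text_lower := PySem.Str.strip (PySem.Str.lower text)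
    fmBLoop text_lower none departments

-- ===== PRECONDITION & SPEC =====
def Spec_fuzzy_match_department (text : String) (departments : List (String × String)) (out : Option String) : Prop := out = fuzzy_match_department_alt text departments
instance (text : String) (departments : List (String × String)) (out : Option String) : Decidable (Spec_fuzzy_match_department text departments out) := by unfold Spec_fuzzy_match_department; infer_instance

-- ===== CLAIM (what is proved, stated in full; the proofs are below) =====
def Claim_equal_fuzzy_match_department : Prop := ∀ (text : String) (departments : List (String × String)), Dom_fuzzy_match_department text departments → Spec_fuzzy_match_department text departments (fuzzy_match_department text departments)

-- ===== LEMMAS AND PROOFS =====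
-- B's one loop computes: exact hit if any, else the pending partial, else A's partial scan.
theorem fmBLoop_eq (tl : String) (ds : List (String × String)) :
    ∀ partial_ : Option String,
      fmBLoop tl partial_ ds =
        match fmAExact tl ds with
        | some dept_id => some dept_id
        | none => partial_.orElse (fun _ => fmAPartial tl ds) := by
  induction ds with
  | nil => intro p; cases p <;> simp [fmBLoop, fmAExact, fmAPartial, Option.orElse]
  | cons hd rest ih =>
    intro p
    obtain ⟨dept_name, dept_id⟩ := hd
    by_cases hex : tl = PySem.Str.lower dept_name
    · simp [fmBLoop, fmAExact, hex]
    · by_cases hsub : (PySem.Str.isIn (PySem.Str.lower dept_name) tl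
          || PySem.Str.isIn tl (PySem.Str.lower dept_name)) = true
      · cases p with
        | none =>
            simp [fmBLoop, fmAExact, fmAPartial, hex, ih, Option.orElse]
            cases fmAExact tl rest <;> split_ifs <;> rfl
        | some v => simp [fmBLoop, fmAExact, hex, ih, Option.orElse]
      · cases p with
        | none =>
            simp [fmBLoop, fmAExact, fmAPartial, hex, ih, Option.orElse]
            cases fmAExact tl rest <;> split_ifs <;> rfl
        | some v => simp [fmBLoop, fmAExact, hex, ih, Option.orElse]

-- ===== VERDICT (by name: the statement is the Claim_ definition above) =====
theorem fuzzy_match_department_spec : Claim_equal_fuzzy_match_department := by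
  intro text departments _
  unfold Spec_fuzzy_match_department fuzzy_match_department fuzzy_match_department_alt
  by_cases h : text = "" ∨ departments = []
  · simp [h]
  · simp only [h, if_false]
    rw [fmBLoop_eq]
    cases fmAExact (PySem.Str.strip (PySem.Str.lower text)) departments <;>
      simp [Option.orElse]
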